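-- pv_equiv track=rewrite | github.com/ANKANA-MONDAL-MCA-A-2024-26-09-UEMK/python | find_nth_term.py | find_nth_term
-- ===== SOURCE A (Python) =====
-- def find_nth_term(n):
--     if n % 2 == 1:  # Odd index term
--         if n == 1:
--             return 2
--         elif n == 3:
--             return 3
--         else:
--             # Pattern for odd indexed terms is 2, 3, 15, ...
--             prev_odd = 2
--             for i in range(3, n + 1, 2):
--                 prev_odd = prev_odd * (i)
--             return prev_odd
--     else:  # Even index term
--         return 4
-- ===== SOURCE B (Python) =====
-- def _prod(lo, hi):
--     # product of the integers in range(lo, hi), by balanced splitting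
--     if hi - lo <= 4:
--         r = 1
--         for i in range(lo, hi):
--             r *= i
--         return r
--     mid = (lo + hi) // 2
--     return _prod(lo, mid) * _prod(mid, hi)
--
--
-- def _fact(m):
--     return _prod(2, m + 1)
--
--
-- def find_nth_term(n):
--     if n % 2 == 1:  # Odd index term
--         if n == 3:
--             return 3
--         # Closed form: 2 * n!! = 2 * n! / (2^k * k!) with k = (n-1)//2 (exact division)
--         k = (n - 1) // 2
--         return 2 * _fact(n) // (2 ** k * _fact(k))
--     else:
--         return 4
-- ===== Notes on version B (the rewrite author's own statement) =====
-- stated objective: alternative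
-- what changed: Replaces the sequential odd-product accumulator with the double-factorial closed form 2*n!//(2^k*k!), k=(n-1)//2 (exact integer division), with factorials computed by a balanced-splitting range product; the even->4 branch and the n==3->3 special case are kept, and n==1 falls out of the formula.
-- outside the precondition, e.g. on find_nth_term(-3): A returns 2, B returns 8.0
import Mathlib
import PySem

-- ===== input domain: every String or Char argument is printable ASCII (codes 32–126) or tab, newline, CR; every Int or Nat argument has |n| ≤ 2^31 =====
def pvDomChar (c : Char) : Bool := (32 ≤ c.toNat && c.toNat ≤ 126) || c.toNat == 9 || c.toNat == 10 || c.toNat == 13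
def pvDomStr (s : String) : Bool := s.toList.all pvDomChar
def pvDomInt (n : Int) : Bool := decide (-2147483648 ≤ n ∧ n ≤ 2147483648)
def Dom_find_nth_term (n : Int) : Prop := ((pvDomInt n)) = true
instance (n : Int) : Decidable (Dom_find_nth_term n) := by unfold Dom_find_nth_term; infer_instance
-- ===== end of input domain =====

-- B replaces A's sequential odd-product loop by the double-factorial closed form 2*n!//(2^k*k!), k=(n-1)//2 (alternative, same cost).


-- ===== PORT A =====
def find_nth_term (n : Int) : Int :=
  if PySem.Int.mod n 2 == 1 then
    if n == 1 then 2
    else if n == 3 then 3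
    else (PySem.List.pyRange 3 (n + 1) 2).foldl (fun prev_odd i => prev_odd * i) 2
  else 4

-- ===== PORT B =====
-- _prod(lo, hi): Source B's balanced-splitting product of range(lo, hi)
def pvProd (lo hi : Int) : Int :=
  if hi - lo ≤ 4 then
    (PySem.List.pyRange lo hi 1).foldl (fun r i => r * i) 1
  else
    let mid := PySem.Int.floordiv (lo + hi) 2
    pvProd lo mid * pvProd mid hi
termination_by (hi - lo).toNat
decreasing_by
  · have h : PySem.Int.floordiv (lo + hi) 2 = (lo + hi) / 2 :=
      PySem.Int.floordiv_eq_ediv_of_pos (by norm_num)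
    rw [h]; omega
  · have h : PySem.Int.floordiv (lo + hi) 2 = (lo + hi) / 2 :=
      PySem.Int.floordiv_eq_ediv_of_pos (by norm_num)
    rw [h]; omega

-- _fact(m) of Source B
def pvFact (m : Int) : Int := pvProd 2 (m + 1)

-- 2 ** k ported as Int power on k.toNat (the branch is only reached with k ≥ 0 inside Pre_)
def find_nth_term_alt (n : Int) : Int :=
  if PySem.Int.mod n 2 == 1 then
    if n == 3 then 3
    else
      let k := PySem.Int.floordiv (n - 1) 2
      PySem.Int.floordiv (2 * pvFact n) (2 ^ k.toNat * pvFact k)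
  else 4

-- ===== PRECONDITION & SPEC =====
-- Pre_ excludes negative odd n (outside the sequence's domain): there B's closed-form division
-- yields a non-integer (a Python float, no value of the declared int type), so no int port can match it.
def Pre_find_nth_term (n : Int) : Prop := 0 ≤ n ∨ PySem.Int.mod n 2 = 0
instance (n : Int) : Decidable (Pre_find_nth_term n) := by unfold Pre_find_nth_term; infer_instance
def pvWitness_find_nth_term : Int := 7

def Spec_find_nth_term (n : Int) (out : Int) : Prop := out = find_nth_term_alt n
instance (n : Int) (out : Int) : Decidable (Spec_find_nth_term n out) := by unfold Spec_find_nth_term; infer_instance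

-- ===== CLAIM (what is proved, stated in full; the proofs are below) =====
def Claim_equal_find_nth_term : Prop := ∀ (n : Int), Dom_find_nth_term n → Pre_find_nth_term n → Spec_find_nth_term n (find_nth_term n)

-- ===== LEMMAS AND PROOFS =====

-- the balanced product is the plain product of the range
lemma pvProd_eq (lo hi : Int) : pvProd lo hi = (PySem.List.pyRange lo hi 1).prod := by
  induction lo, hi using pvProd.induct with
  | case1 lo hi h =>
    rw [pvProd, if_pos h, List.prod_eq_foldl]
  | case2 lo hi h mid ih1 ih2 =>
    have hm : PySem.Int.floordiv (lo + hi) 2 = (lo + hi) / 2 :=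
      PySem.Int.floordiv_eq_ediv_of_pos (by norm_num)
    rw [pvProd, if_neg h]
    simp only []
    rw [ih1, ih2,
      PySem.List.pyRange_one_append lo (PySem.Int.floordiv (lo + hi) 2) hi
        (by rw [hm]; omega) (by rw [hm]; omega), List.prod_append]

-- the balanced factorial computes the factorial
lemma pvFact_natCast (M : Nat) : pvFact (M : Int) = (Nat.factorial M : Int) := by
  induction M with
  | zero => unfold pvFact; rw [pvProd_eq]; decide
  | succ m ih =>
    rcases Nat.eq_zero_or_pos m with hm | hm
    · subst hm; unfold pvFact; rw [pvProd_eq]; decide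
    · unfold pvFact at *
      rw [pvProd_eq] at ih ⊢
      have hstep : PySem.List.pyRange 2 (((m + 1 : Nat) : Int) + 1) 1
          = PySem.List.pyRange 2 ((m : Int) + 1) 1 ++ [((m : Int) + 1)] := by
        have h2 : ((m + 1 : Nat) : Int) + 1 = ((m : Int) + 1) + 1 := by push_cast; ring
        rw [h2]
        exact PySem.List.pyRange_one_succ_right (a := 2) (b := (m : Int) + 1) (by omega)
      rw [hstep, List.prod_append, ih]
      simp only [List.prod_cons, List.prod_nil, Nat.factorial_succ]
      push_cast
      ring

-- A's odd-product loop for n = 2k+1, as a function of k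
def pvOddLoop (k : Nat) : Int :=
  ((List.range k).map (fun j : Nat => (3 : Int) + 2 * (j : Int))).foldl (fun prev_odd i => prev_odd * i) 2

lemma pvRange_odd (k : Nat) : PySem.List.pyRange 3 ((2 * (k : Int) + 1) + 1) 2
    = (List.range k).map (fun j : Nat => (3 : Int) + 2 * (j : Int)) := by
  rw [PySem.List.pyRange_of_pos 3 ((2 * (k : Int) + 1) + 1) (by norm_num)]
  rcases Nat.eq_zero_or_pos k with hk | hk
  · subst hk; norm_num
  · have hlt : (3 : Int) < (2 * (k : Int) + 1) + 1 := by omega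
    rw [if_pos hlt]
    have hcount : ((2 * (k : Int) + 1) + 1 - 3 + 2 - 1) / 2 = (k : Int) := by omega
    rw [hcount, Int.toNat_natCast]

-- the key double-factorial identity: 2^k * k! * (A's loop value) = 2 * (2k+1)!
lemma pvKey (k : Nat) : (2 : Int) ^ k * (Nat.factorial k : Int) * pvOddLoop k
    = 2 * (Nat.factorial (2 * k + 1) : Int) := by
  induction k with
  | zero => decide
  | succ m ih =>
    have hloop : pvOddLoop (m + 1) = pvOddLoop m * ((3 : Int) + 2 * (m : Int)) := by
      unfold pvOddLoop
      rw [List.range_succ, List.map_append, List.foldl_append]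
      simp
    have h1 : 2 * (m + 1) + 1 = (2 * m + 1) + 1 + 1 := by omega
    rw [hloop, h1, Nat.factorial_succ, Nat.factorial_succ, Nat.factorial_succ]
    push_cast at ih ⊢
    linear_combination (2 * ((m : Int) + 1) * (3 + 2 * (m : Int))) * ih

-- the two ports agree at every odd n ≥ 0 other than 3
lemma pvOdd_case (n : Int) (hn0 : 0 ≤ n) (hodd : n % 2 = 1) :
    (PySem.List.pyRange 3 (n + 1) 2).foldl (fun prev_odd i => prev_odd * i) 2
      = PySem.Int.floordiv (2 * pvFact n)
          (2 ^ (PySem.Int.floordiv (n - 1) 2).toNat * pvFact (PySem.Int.floordiv (n - 1) 2)) := by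
  set k : Nat := ((n - 1) / 2).toNat with hk
  have hnk : n = 2 * (k : Int) + 1 := by omega
  have hfd : PySem.Int.floordiv (n - 1) 2 = (k : Int) := by
    rw [PySem.Int.floordiv_eq_ediv_of_pos (by norm_num)]; omega
  have hfn : pvFact n = (Nat.factorial (2 * k + 1) : Int) := by
    rw [hnk]
    have h : (2 * (k : Int) + 1) = ((2 * k + 1 : Nat) : Int) := by push_cast; ring
    rw [h, pvFact_natCast]
  have hloopA : (PySem.List.pyRange 3 (n + 1) 2).foldl (fun prev_odd i => prev_odd * i) 2
      = pvOddLoop k := by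
    rw [hnk, pvRange_odd]; rfl
  have hpos : (0 : Int) < (2 : Int) ^ k * (Nat.factorial k : Int) := by positivity
  have hdiv : 2 * pvFact n = ((2 : Int) ^ k * (Nat.factorial k : Int)) * pvOddLoop k := by
    rw [hfn, ← pvKey k]
  rw [hloopA, hfd, pvFact_natCast, Int.toNat_natCast, hdiv,
    PySem.Int.floordiv_eq_ediv_of_pos hpos]
  exact (Int.mul_ediv_cancel_left _ (ne_of_gt hpos)).symm

-- ===== VERDICT (by name: the statement is the Claim_ definition above) =====
theorem find_nth_term_spec : Claim_equal_find_nth_term := by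
  intro n _ hpre
  unfold Spec_find_nth_term find_nth_term find_nth_term_alt
  have hem : PySem.Int.mod n 2 = n % 2 := PySem.Int.mod_eq_emod_of_pos (by norm_num)
  rcases PySem.Int.mod_two_eq n with hmod | hmod
  · have heven : n % 2 = 0 := by rw [← hem]; exact hmod
    simp [heven]
  · have hodd : n % 2 = 1 := by rw [← hem]; exact hmod
    have hn0 : 0 ≤ n := by
      rcases hpre with h | h
      · exact h
      · rw [hmod] at h; norm_num at h
    by_cases h1 : n = 1
    · subst h1
      have h := pvOdd_case 1 (by norm_num) (by norm_num)
      have h2 : (PySem.List.pyRange 3 (1 + 1) 2).foldl (fun prev_odd i => prev_odd * i) 2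
          = 2 := by decide
      simp only [show (PySem.Int.mod 1 2 == 1) = true from by decide,
        show ((1 : Int) == 1) = true from by decide,
        show ((1 : Int) == 3) = false from by decide, if_true]
      exact h2.symm.trans h
    · by_cases h3 : n = 3
      · subst h3; decide
      · simp only [hmod, BEq.rfl, if_true, beq_iff_eq, h1, h3, if_false]
        exact pvOdd_case n hn0 hodd
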